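-- pv_equiv track=rewrite | github.com/hagaiarmoni-sys/andalusia | itinerary_core.py | cities_match
-- ===== SOURCE A (Python) =====
-- import unicodedata
--
-- def normalize_city_name(city_name):
--     """Normalize city name by removing accents and converting to lowercase"""
--     if not city_name:
--         return ""
--
--     city_name = str(city_name)
--     nfd = unicodedata.normalize('NFD', city_name)
--     without_accents = ''.join(char for char in nfd if unicodedata.category(char) != 'Mn')
--     return without_accents.lower().strip()
--
-- def cities_match(city1, city2):
--     """Check if two city names match (handling accents and aliases)"""
--     if not city1 or not city2:
--         return False
--
--     norm1 = normalize_city_name(city1)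
--     norm2 = normalize_city_name(city2)
--
--     if norm1 == norm2:
--         return True
--
--     # City aliases
--     city_aliases = {
--         'seville': {'seville', 'sevilla'},
--         'cordoba': {'cordoba', 'córdoba'},
--         'malaga': {'malaga', 'málaga'},
--         'cadiz': {'cadiz', 'cádiz'},
--         'jerez': {'jerez', 'jerez de la frontera'},
--         'granada': {'granada'},
--         'ronda': {'ronda'},
--         'tarifa': {'tarifa'},
--         'almeria': {'almeria', 'almería'},
--         'antequera': {'antequera'},
--         'marbella': {'marbella'},
--         'nerja': {'nerja'}
--     }
--
--     for canonical, aliases in city_aliases.items():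
--         if norm1 in aliases and norm2 in aliases:
--             return True
--
--     # Partial match for longer names
--     if len(norm1) > 3 and len(norm2) > 3 and (norm1 in norm2 or norm2 in norm1):
--         return True
--
--     return False
-- ===== SOURCE B (Python) =====
-- import unicodedata
--
-- def normalize_city_name(city_name):
--     """Normalize city name by removing accents and converting to lowercase"""
--     if not city_name:
--         return ""
--
--     city_name = str(city_name)
--     nfd = unicodedata.normalize('NFD', city_name)
--     without_accents = ''.join(char for char in nfd if unicodedata.category(char) != 'Mn')
--     return without_accents.lower().strip()
--
-- # Reverse index: alias -> canonical city name.  _city_key canonicalizes a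
-- # normalized name in one lookup; unknown names are their own key.
-- _ALIAS_INDEX = {
--     'seville': 'seville', 'sevilla': 'seville',
--     'cordoba': 'cordoba', 'córdoba': 'cordoba',
--     'malaga': 'malaga', 'málaga': 'malaga',
--     'cadiz': 'cadiz', 'cádiz': 'cadiz',
--     'jerez': 'jerez', 'jerez de la frontera': 'jerez',
--     'granada': 'granada',
--     'ronda': 'ronda',
--     'tarifa': 'tarifa',
--     'almeria': 'almeria', 'almería': 'almeria',
--     'antequera': 'antequera',
--     'marbella': 'marbella',
--     'nerja': 'nerja',
-- }
--
-- def _city_key(norm):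
--     """Canonical key of a normalized name (the name itself if unaliased)."""
--     return _ALIAS_INDEX.get(norm, norm)
--
-- def cities_match(city1, city2):
--     """Check if two city names match (handling accents and aliases)"""
--     if not city1 or not city2:
--         return False
--
--     norm1 = normalize_city_name(city1)
--     norm2 = normalize_city_name(city2)
--
--     # canonicalize both names once; a single key comparison subsumes both
--     # A's direct-equality check and its scan over the alias groups
--     if _city_key(norm1) == _city_key(norm2):
--         return True
--
--     return len(norm1) > 3 and len(norm2) > 3 and (norm1 in norm2 or norm2 in norm1)
-- ===== Notes on version B (the rewrite author's own statement) =====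
-- stated objective: simpler
-- what changed: B canonicalizes each normalized name to a key through a precomputed reverse alias index and compares the two keys once, so A's separate direct-equality check and its loop over the alias groups collapse into a single symmetric key comparison.
import Mathlib
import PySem

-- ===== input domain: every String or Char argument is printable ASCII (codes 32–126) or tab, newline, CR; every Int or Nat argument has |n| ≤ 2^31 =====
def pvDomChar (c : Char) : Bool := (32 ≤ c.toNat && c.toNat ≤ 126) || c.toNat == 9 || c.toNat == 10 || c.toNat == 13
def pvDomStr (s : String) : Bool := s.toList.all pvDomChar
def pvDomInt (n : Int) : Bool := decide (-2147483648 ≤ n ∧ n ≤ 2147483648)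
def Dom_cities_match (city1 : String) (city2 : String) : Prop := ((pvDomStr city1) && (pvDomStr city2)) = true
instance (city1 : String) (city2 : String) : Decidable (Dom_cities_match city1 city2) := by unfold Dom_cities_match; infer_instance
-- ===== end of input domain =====

-- B canonicalizes each normalized name to a key via a precomputed reverse index and compares the
-- two keys once, subsuming A's direct-equality check and its scan over alias groups (objective: simpler).


-- ===== PORT A =====
-- normalize_city_name: on the printable-ASCII domain, NFD normalization is the
-- identity and no character has category 'Mn', so the accent-stripping pass is
-- the identity there; the port keeps the falsy guard and .lower().strip() exactly.
def normalize_city_name (city_name : String) : String :=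
  if city_name == "" then ""
  else PySem.Str.strip (PySem.Str.lower city_name)

-- the city_aliases dict: list of (canonical, alias set); Python sets of string
-- literals become their distinct-element lists in literal order.
def cityAliases : List (String × List String) :=
  [("seville", ["seville", "sevilla"]),
   ("cordoba", ["cordoba", "córdoba"]),
   ("malaga", ["malaga", "málaga"]),
   ("cadiz", ["cadiz", "cádiz"]),
   ("jerez", ["jerez", "jerez de la frontera"]),
   ("granada", ["granada"]),
   ("ronda", ["ronda"]),
   ("tarifa", ["tarifa"]),
   ("almeria", ["almeria", "almería"]),
   ("antequera", ["antequera"]),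
   ("marbella", ["marbella"]),
   ("nerja", ["nerja"])]

-- the 'for canonical, aliases in city_aliases.items(): if norm1 in aliases and norm2 in aliases: return True' loop
def aliasScan : List (String × List String) → String → String → Bool
  | [], _, _ => false
  | (_, aliases) :: rest, n1, n2 =>
      if aliases.contains n1 && aliases.contains n2 then true
      else aliasScan rest n1 n2

def cities_match (city1 : String) (city2 : String) : Bool :=
  if city1 == "" || city2 == "" then false
  else
    let norm1 := normalize_city_name city1
    let norm2 := normalize_city_name city2
    if norm1 == norm2 then true
    else if aliasScan cityAliases norm1 norm2 then true
    else if decide (3 < PySem.Str.len norm1) && decide (3 < PySem.Str.len norm2)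
            && (PySem.Str.isIn norm1 norm2 || PySem.Str.isIn norm2 norm1) then true
    else false

-- ===== PORT B =====
-- _ALIAS_INDEX: reverse index alias -> canonical city
def aliasIndex : PySem.Dict String String :=
  PySem.Dict.mk
    [("seville", "seville"), ("sevilla", "seville"),
     ("cordoba", "cordoba"), ("córdoba", "cordoba"),
     ("malaga", "malaga"), ("málaga", "malaga"),
     ("cadiz", "cadiz"), ("cádiz", "cadiz"),
     ("jerez", "jerez"), ("jerez de la frontera", "jerez"),
     ("granada", "granada"),
     ("ronda", "ronda"),
     ("tarifa", "tarifa"),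
     ("almeria", "almeria"), ("almería", "almeria"),
     ("antequera", "antequera"),
     ("marbella", "marbella"),
     ("nerja", "nerja")]

-- _city_key: canonical key of a normalized name (the name itself if unaliased)
def cityKey (norm : String) : String := aliasIndex.getD norm norm

def cities_match_alt (city1 : String) (city2 : String) : Bool :=
  if city1 == "" || city2 == "" then false
  else
    let norm1 := normalize_city_name city1
    let norm2 := normalize_city_name city2
    if cityKey norm1 == cityKey norm2 then true
    else decide (3 < PySem.Str.len norm1) && decide (3 < PySem.Str.len norm2)
          && (PySem.Str.isIn norm1 norm2 || PySem.Str.isIn norm2 norm1)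

-- ===== PRECONDITION & SPEC =====
def Spec_cities_match (city1 : String) (city2 : String) (out : Bool) : Prop := out = cities_match_alt city1 city2
instance (city1 : String) (city2 : String) (out : Bool) : Decidable (Spec_cities_match city1 city2 out) := by unfold Spec_cities_match; infer_instance

-- ===== CLAIM (what is proved, stated in full; the proofs are below) =====
def Claim_equal_cities_match : Prop := ∀ (city1 : String) (city2 : String), Dom_cities_match city1 city2 → Spec_cities_match city1 city2 (cities_match city1 city2)

-- ===== LEMMAS AND PROOFS =====

-- direct equality OR A's alias-group scan  =  equality of B's canonical keys, for ALL strings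
theorem key_branch_eq (n1 n2 : String) :
    ((n1 == n2) || aliasScan cityAliases n1 n2) = (cityKey n1 == cityKey n2) := by
  by_cases h1 : n1 = "seville" ∨ n1 = "sevilla" ∨ n1 = "cordoba" ∨ n1 = "córdoba" ∨
      n1 = "malaga" ∨ n1 = "málaga" ∨ n1 = "cadiz" ∨ n1 = "cádiz" ∨ n1 = "jerez" ∨
      n1 = "jerez de la frontera" ∨ n1 = "granada" ∨ n1 = "ronda" ∨ n1 = "tarifa" ∨
      n1 = "almeria" ∨ n1 = "almería" ∨ n1 = "antequera" ∨ n1 = "marbella" ∨ n1 = "nerja"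
  · by_cases h2 : n2 = "seville" ∨ n2 = "sevilla" ∨ n2 = "cordoba" ∨ n2 = "córdoba" ∨
        n2 = "malaga" ∨ n2 = "málaga" ∨ n2 = "cadiz" ∨ n2 = "cádiz" ∨ n2 = "jerez" ∨
        n2 = "jerez de la frontera" ∨ n2 = "granada" ∨ n2 = "ronda" ∨ n2 = "tarifa" ∨
        n2 = "almeria" ∨ n2 = "almería" ∨ n2 = "antequera" ∨ n2 = "marbella" ∨ n2 = "nerja"
    · rcases h1 with rfl|rfl|rfl|rfl|rfl|rfl|rfl|rfl|rfl|rfl|rfl|rfl|rfl|rfl|rfl|rfl|rfl|rfl <;>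
        rcases h2 with rfl|rfl|rfl|rfl|rfl|rfl|rfl|rfl|rfl|rfl|rfl|rfl|rfl|rfl|rfl|rfl|rfl|rfl <;>
        decide
    · push Not at h2
      obtain ⟨a1, a2, a3, a4, a5, a6, a7, a8, a9, a10, a11, a12, a13, a14, a15, a16, a17, a18⟩ := h2
      rcases h1 with rfl|rfl|rfl|rfl|rfl|rfl|rfl|rfl|rfl|rfl|rfl|rfl|rfl|rfl|rfl|rfl|rfl|rfl <;>
        simp [aliasScan, cityAliases, cityKey, aliasIndex, PySem.Dict.getD, PySem.Dict.get?,
          a1, Ne.symm a1, a2, Ne.symm a2, a3, Ne.symm a3, a4, Ne.symm a4, a5, Ne.symm a5,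
          a6, Ne.symm a6, a7, Ne.symm a7, a8, Ne.symm a8, a9, Ne.symm a9, a10, Ne.symm a10,
          a11, Ne.symm a11, a12, Ne.symm a12, a13, Ne.symm a13, a14, Ne.symm a14, a15, Ne.symm a15,
          a16, Ne.symm a16, a17, Ne.symm a17, a18, Ne.symm a18]
  · push Not at h1
    obtain ⟨a1, a2, a3, a4, a5, a6, a7, a8, a9, a10, a11, a12, a13, a14, a15, a16, a17, a18⟩ := h1
    by_cases h2 : n2 = "seville" ∨ n2 = "sevilla" ∨ n2 = "cordoba" ∨ n2 = "córdoba" ∨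
        n2 = "malaga" ∨ n2 = "málaga" ∨ n2 = "cadiz" ∨ n2 = "cádiz" ∨ n2 = "jerez" ∨
        n2 = "jerez de la frontera" ∨ n2 = "granada" ∨ n2 = "ronda" ∨ n2 = "tarifa" ∨
        n2 = "almeria" ∨ n2 = "almería" ∨ n2 = "antequera" ∨ n2 = "marbella" ∨ n2 = "nerja"
    · rcases h2 with rfl|rfl|rfl|rfl|rfl|rfl|rfl|rfl|rfl|rfl|rfl|rfl|rfl|rfl|rfl|rfl|rfl|rfl <;>
        simp [aliasScan, cityAliases, cityKey, aliasIndex, PySem.Dict.getD, PySem.Dict.get?,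
          a1, Ne.symm a1, a2, Ne.symm a2, a3, Ne.symm a3, a4, Ne.symm a4, a5, Ne.symm a5,
          a6, Ne.symm a6, a7, Ne.symm a7, a8, Ne.symm a8, a9, Ne.symm a9, a10, Ne.symm a10,
          a11, Ne.symm a11, a12, Ne.symm a12, a13, Ne.symm a13, a14, Ne.symm a14, a15, Ne.symm a15,
          a16, Ne.symm a16, a17, Ne.symm a17, a18, Ne.symm a18]
    · push Not at h2
      obtain ⟨b1, b2, b3, b4, b5, b6, b7, b8, b9, b10, b11, b12, b13, b14, b15, b16, b17, b18⟩ := h2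
      simp [aliasScan, cityAliases, cityKey, aliasIndex, PySem.Dict.getD, PySem.Dict.get?,
        a1, Ne.symm a1, a2, Ne.symm a2, a3, Ne.symm a3, a4, Ne.symm a4, a5, Ne.symm a5,
        a6, Ne.symm a6, a7, Ne.symm a7, a8, Ne.symm a8, a9, Ne.symm a9, a10, Ne.symm a10,
        a11, Ne.symm a11, a12, Ne.symm a12, a13, Ne.symm a13, a14, Ne.symm a14, a15, Ne.symm a15,
        a16, Ne.symm a16, a17, Ne.symm a17, a18, Ne.symm a18,
        b1, Ne.symm b1, b2, Ne.symm b2, b3, Ne.symm b3, b4, Ne.symm b4, b5, Ne.symm b5,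
        b6, Ne.symm b6, b7, Ne.symm b7, b8, Ne.symm b8, b9, Ne.symm b9, b10, Ne.symm b10,
        b11, Ne.symm b11, b12, Ne.symm b12, b13, Ne.symm b13, b14, Ne.symm b14, b15, Ne.symm b15,
        b16, Ne.symm b16, b17, Ne.symm b17, b18, Ne.symm b18]

-- ===== VERDICT (by name: the statement is the Claim_ definition above) =====
theorem cities_match_spec : Claim_equal_cities_match := by
  intro city1 city2 _
  unfold Spec_cities_match cities_match cities_match_alt
  simp only [← key_branch_eq]
  cases h1 : (normalize_city_name city1 == normalize_city_name city2) <;>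
    cases h2 : aliasScan cityAliases (normalize_city_name city1) (normalize_city_name city2) <;>
    simp [h1, h2]
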